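-- pv_equiv track=rewrite | github.com/opencitations/ramose | ramose.py | _drop_columns
-- ===== SOURCE A (Python) =====
-- def _drop_columns(rows, vars_):
--     if not rows:
--         return rows
--     vars_set = set(v.lstrip("?") for v in vars_)
--     out = []
--     for r in rows:
--         out.append({k: v for k, v in r.items() if k not in vars_set and ("?" + k) not in vars_set})
--     return out
-- ===== SOURCE B (Python) =====
-- def _drop_columns(rows, vars_):
--     drop = {v.lstrip("?") for v in vars_}
--     out = []
--     for r in rows:
--         d = dict(r)
--         for col in drop:
--             d.pop(col, None)
--         out.append(d)
--     return out
-- ===== Notes on version B (the rewrite author's own statement) =====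
-- stated objective: alternative
-- what changed: Instead of filtering every (key, value) pair of each row against the drop-set (with the dead '?'+k re-test), B shallow-copies each row and iterates over the drop-set itself, popping each unwanted column, so the inner traversal is over the columns to remove rather than over the row's items.
import Mathlib
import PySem

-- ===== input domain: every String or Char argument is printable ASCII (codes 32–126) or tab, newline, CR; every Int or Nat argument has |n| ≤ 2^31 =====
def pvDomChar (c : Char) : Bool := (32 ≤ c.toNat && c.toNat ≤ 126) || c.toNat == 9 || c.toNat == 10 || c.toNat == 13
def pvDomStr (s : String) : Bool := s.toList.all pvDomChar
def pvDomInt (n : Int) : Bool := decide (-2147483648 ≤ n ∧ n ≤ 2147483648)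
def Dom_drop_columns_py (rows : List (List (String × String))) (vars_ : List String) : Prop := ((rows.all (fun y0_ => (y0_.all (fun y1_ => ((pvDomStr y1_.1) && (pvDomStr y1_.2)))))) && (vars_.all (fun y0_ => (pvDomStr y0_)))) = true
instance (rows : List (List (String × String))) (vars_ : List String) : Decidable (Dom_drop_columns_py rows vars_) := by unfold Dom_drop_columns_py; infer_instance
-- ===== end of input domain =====

-- B copies each row and pops every column of the drop-set from it (inner traversal over
-- the columns to remove, not over the row's items), with no early-empty guard and without
-- A's dead '?'+k re-test; same result, alternative decomposition.
-- Rows model Python dicts (assoc lists); d.pop(col, None) removes every pair with that key, exact for dicts.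

-- ===== PORT A =====
-- v.lstrip("?"): drops every leading '?' character; exact (no other chars stripped)
def pvLstripQ (v : String) : String := String.ofList (v.toList.dropWhile (· == '?'))

def drop_columns_py (rows : List (List (String × String))) (vars_ : List String) : List (List (String × String)) :=
  if rows = [] then rows
  else
    let vars_set : PySem.Set String := PySem.Set.ofList (vars_.map pvLstripQ)
    -- out = []; for r in rows: out.append({k: v for k, v in r.items() if k not in vars_set and ("?"+k) not in vars_set})
    rows.foldl (fun out r =>
      out ++ [r.filter (fun kv =>
        !(PySem.Set.contains vars_set kv.1) && !(PySem.Set.contains vars_set ("?" ++ kv.1)))]) []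

-- ===== PORT B =====
-- d.pop(col, None): delete every pair whose key is col (exact for a dict as assoc list)
def pvPopCol (col : String) : List (String × String) → List (String × String)
  | [] => []
  | kv :: rest => if kv.1 == col then pvPopCol col rest else kv :: pvPopCol col rest

-- for col in drop: d.pop(col, None)   (popping all columns is order-independent, so the Set's list order is exact)
def pvPopAll : List String → List (String × String) → List (String × String)
  | [], d => d
  | c :: cs, d => pvPopAll cs (pvPopCol c d)

-- for r in rows: d = dict(r); …; out.append(d)
def pvRowsLoop (cols : List String) : List (List (String × String)) → List (List (String × String))
  | [] => []
  | r :: rs => pvPopAll cols r :: pvRowsLoop cols rs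

def drop_columns_py_alt (rows : List (List (String × String))) (vars_ : List String) : List (List (String × String)) :=
  let drop : PySem.Set String := PySem.Set.ofList (vars_.map pvLstripQ)
  pvRowsLoop drop rows   -- PySem.Set is its list of distinct elements

-- ===== PRECONDITION & SPEC =====
def Spec_drop_columns_py (rows : List (List (String × String))) (vars_ : List String) (out : List (List (String × String))) : Prop := out = drop_columns_py_alt rows vars_
instance (rows : List (List (String × String))) (vars_ : List String) (out : List (List (String × String))) : Decidable (Spec_drop_columns_py rows vars_ out) := by unfold Spec_drop_columns_py; infer_instance

-- ===== CLAIM =====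
def Claim_equal_drop_columns_py : Prop := ∀ (rows : List (List (String × String))) (vars_ : List String), Dom_drop_columns_py rows vars_ → Spec_drop_columns_py rows vars_ (drop_columns_py rows vars_)

-- ===== LEMMAS AND PROOFS =====

-- no stripped variable name starts with '?'
theorem pvLstripQ_head (v : String) : ¬ (pvLstripQ v).toList.head? = some '?' := by
  unfold pvLstripQ
  intro h
  simp only [String.toList_ofList] at h
  have hw := List.head?_dropWhile_not (p := (· == '?')) (l := v.toList)
  rw [h] at hw
  simp at hw

-- the "?"+k test in A is always true: the drop-set holds only lstripped names
theorem qmark_not_mem (vars_ : List String) (k : String) :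
    PySem.Set.contains (PySem.Set.ofList (vars_.map pvLstripQ)) ("?" ++ k) = false := by
  simp only [PySem.Set.contains, List.contains_eq_mem, decide_eq_false_iff_not]
  intro hmem
  have hmem' : ("?" ++ k) ∈ vars_.map pvLstripQ :=
    (PySem.Set.mem_ofList _ _).mp hmem
  rcases List.mem_map.mp hmem' with ⟨v, -, hv⟩
  apply pvLstripQ_head v
  rw [hv]
  have : ("?" ++ k).toList = '?' :: k.toList := by simp
  simp [this]

-- popping one column is a filter
theorem popCol_eq_filter (col : String) (d : List (String × String)) :
    pvPopCol col d = d.filter (fun kv => !(kv.1 == col)) := by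
  induction d with
  | nil => rfl
  | cons kv rest ih =>
      by_cases h : kv.1 = col <;> simp [pvPopCol, h, ih]

-- popping every column of L is a single filter against membership in L
theorem popAll_eq_filter (L : List String) (d : List (String × String)) :
    pvPopAll L d = d.filter (fun kv => !(L.contains kv.1)) := by
  induction L generalizing d with
  | nil => simp [pvPopAll]
  | cons c cs ih =>
      simp only [pvPopAll, popCol_eq_filter, ih, List.filter_filter]
      apply List.filter_congr
      intro kv _
      by_cases h : kv.1 = c <;> simp [h]

-- B's outer recursion is a map
theorem rowsLoop_eq_map (cols : List String) (rows : List (List (String × String))) :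
    pvRowsLoop cols rows = rows.map (pvPopAll cols) := by
  induction rows with
  | nil => rfl
  | cons r rs ih => simp [pvRowsLoop, ih]

-- A's accumulator loop is a map
theorem foldl_append_singleton {α β : Type} (f : α → β) (xs : List α) (acc : List β) :
    xs.foldl (fun out r => out ++ [f r]) acc = acc ++ xs.map f := by
  induction xs generalizing acc with
  | nil => simp
  | cons x xs ih => simp [ih]

-- ===== VERDICT =====
theorem drop_columns_py_spec : Claim_equal_drop_columns_py := by
  intro rows vars_ _
  unfold Spec_drop_columns_py drop_columns_py drop_columns_py_alt
  rw [rowsLoop_eq_map]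
  by_cases h : rows = []
  · simp [h]
  · simp only [if_neg h]
    rw [foldl_append_singleton, List.nil_append]
    apply List.map_congr_left
    intro r _
    rw [popAll_eq_filter]
    apply List.filter_congr
    intro kv _
    rw [qmark_not_mem vars_ kv.1]
    simp [PySem.Set.contains]
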